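-- pv_equiv track=rewrite | github.com/bgyehi/2025_IDM_Lab_Study | 2차과제.py | _calculate_tardiness
-- ===== SOURCE A (Python) =====
-- def _calculate_tardiness(order):
--     completion_time = 0
--     total_tardiness = 0
--     for job in order:
--         completion_time += job["p"]
--         tardiness = max(0, completion_time - job["d"])
--         total_tardiness += tardiness
--     return total_tardiness
-- ===== SOURCE B (Python) =====
-- def _calculate_tardiness(order):
--     # Walk the schedule BACK-TO-FRONT: start from the total workload (= last
--     # job's completion time) and subtract processing times while summing
--     # tardiness.  Correct because job i's completion time equals the total
--     # processing time minus the processing of all jobs after i.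
--     remaining = sum(job["p"] for job in order)
--     total_tardiness = 0
--     for job in reversed(order):
--         total_tardiness += max(0, remaining - job["d"])
--         remaining -= job["p"]
--     return total_tardiness
-- ===== Notes on version B (the rewrite author's own statement) =====
-- stated objective: alternative
-- what changed: B traverses the schedule in reverse, starting from the grand total of processing times (the final completion time) and subtracting each job's processing time while summing tardiness, instead of A's forward loop accumulating prefix completion times.
import Mathlib
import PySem

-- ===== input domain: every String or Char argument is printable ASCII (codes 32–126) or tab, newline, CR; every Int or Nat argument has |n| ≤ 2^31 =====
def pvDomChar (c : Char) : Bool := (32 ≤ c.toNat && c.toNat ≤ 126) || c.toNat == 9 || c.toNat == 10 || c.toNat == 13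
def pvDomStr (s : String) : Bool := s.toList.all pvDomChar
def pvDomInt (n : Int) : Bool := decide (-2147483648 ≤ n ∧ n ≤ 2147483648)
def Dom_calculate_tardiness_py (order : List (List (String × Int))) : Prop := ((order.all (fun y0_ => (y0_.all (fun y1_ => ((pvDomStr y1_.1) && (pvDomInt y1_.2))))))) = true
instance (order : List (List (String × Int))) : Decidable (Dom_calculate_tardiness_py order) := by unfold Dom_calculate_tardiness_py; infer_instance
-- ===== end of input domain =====

-- B sums tardiness in a reverse traversal, starting from the total workload and
-- subtracting processing times, instead of A's forward prefix-accumulating loop.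


-- job["k"] on a Python dict: lookup after dict construction (last duplicate wins).
-- KeyError (missing key) is excluded by Pre_, so getD 0 is never taken there.
def pvJobGet (job : List (String × Int)) (k : String) : Int :=
  ((PySem.Dict.ofList job).get? k).getD 0

-- ===== PORT A =====
def calculate_tardiness_py (order : List (List (String × Int))) : Int :=
  (order.foldl (fun (st : Int × Int) job =>
    let completion_time := st.1 + pvJobGet job "p"
    let tardiness := max 0 (completion_time - pvJobGet job "d")
    (completion_time, st.2 + tardiness)) (0, 0)).2

-- ===== PORT B =====
-- remaining = sum(job["p"] for job in order)
def pvTotalP (order : List (List (String × Int))) : Int :=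
  order.foldl (fun s job => s + pvJobGet job "p") 0

def calculate_tardiness_py_alt (order : List (List (String × Int))) : Int :=
  (order.reverse.foldl (fun (st : Int × Int) job =>
    (st.1 - pvJobGet job "p", st.2 + max 0 (st.1 - pvJobGet job "d")))
    (pvTotalP order, 0)).2

-- ===== PRECONDITION & SPEC =====
-- Pre_ excludes jobs missing the "p" or "d" key, on which Python A raises KeyError.
def Pre_calculate_tardiness_py (order : List (List (String × Int))) : Prop :=
  (order.all (fun job => (PySem.Dict.ofList job).contains "p" && (PySem.Dict.ofList job).contains "d")) = true
instance (order : List (List (String × Int))) : Decidable (Pre_calculate_tardiness_py order) := by unfold Pre_calculate_tardiness_py; infer_instance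

def pvWitness_calculate_tardiness_py : (List (List (String × Int))) :=
  [[("p", 3), ("d", 2)], [("p", 1), ("d", 10)]]

def Spec_calculate_tardiness_py (order : List (List (String × Int))) (out : Int) : Prop := out = calculate_tardiness_py_alt order
instance (order : List (List (String × Int))) (out : Int) : Decidable (Spec_calculate_tardiness_py order out) := by unfold Spec_calculate_tardiness_py; infer_instance

-- ===== CLAIM (what is proved, stated in full; the proofs are below) =====
def Claim_equal_calculate_tardiness_py : Prop := ∀ (order : List (List (String × Int))), Dom_calculate_tardiness_py order → Pre_calculate_tardiness_py order → Spec_calculate_tardiness_py order (calculate_tardiness_py order)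

-- ===== LEMMAS AND PROOFS =====

-- reference recursion: tardiness sum starting from completion offset c
def pvTsum (order : List (List (String × Int))) (c : Int) : Int :=
  match order with
  | [] => 0
  | job :: rest =>
      max 0 (c + pvJobGet job "p" - pvJobGet job "d") + pvTsum rest (c + pvJobGet job "p")

lemma psum_shift (order : List (List (String × Int))) :
    ∀ a : Int, order.foldl (fun s job => s + pvJobGet job "p") a
      = a + order.foldl (fun s job => s + pvJobGet job "p") 0 := by
  induction order with
  | nil => intro a; simp
  | cons job rest ih =>
      intro a
      simp only [List.foldl_cons]
      rw [ih (a + pvJobGet job "p"), ih (0 + pvJobGet job "p")]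
      ring

lemma a_fold_aux (order : List (List (String × Int))) :
    ∀ (c t : Int),
      (order.foldl (fun (st : Int × Int) job =>
        let completion_time := st.1 + pvJobGet job "p"
        let tardiness := max 0 (completion_time - pvJobGet job "d")
        (completion_time, st.2 + tardiness)) (c, t)).2 = t + pvTsum order c := by
  induction order with
  | nil => intro c t; simp [pvTsum]
  | cons job rest ih =>
      intro c t
      simp only [List.foldl_cons, pvTsum]
      rw [ih]
      ring

lemma b_fold_aux (order : List (List (String × Int))) :
    ∀ (c t : Int),
      order.reverse.foldl (fun (st : Int × Int) job =>
        (st.1 - pvJobGet job "p", st.2 + max 0 (st.1 - pvJobGet job "d")))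
        (c + pvTotalP order, t)
      = (c, t + pvTsum order c) := by
  induction order with
  | nil => intro c t; simp [pvTotalP, pvTsum]
  | cons job rest ih =>
      intro c t
      have hp : pvTotalP (job :: rest) = pvJobGet job "p" + pvTotalP rest := by
        simp only [pvTotalP, List.foldl_cons]
        rw [psum_shift]
        ring
      simp only [List.reverse_cons, List.foldl_append, pvTsum]
      rw [hp, show c + (pvJobGet job "p" + pvTotalP rest)
            = (c + pvJobGet job "p") + pvTotalP rest by ring,
          ih (c + pvJobGet job "p") t]
      simp only [List.foldl_cons, List.foldl_nil, Prod.mk.injEq]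
      constructor <;> ring

-- ===== VERDICT (by name: the statement is the Claim_ definition above) =====
theorem calculate_tardiness_py_spec : Claim_equal_calculate_tardiness_py := by
  intro order _ _
  show calculate_tardiness_py order = calculate_tardiness_py_alt order
  unfold calculate_tardiness_py calculate_tardiness_py_alt
  rw [a_fold_aux, show pvTotalP order = 0 + pvTotalP order by ring, b_fold_aux]
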